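-- pv_equiv track=rewrite | github.com/dhc8/advent-of-code-2017 | 6.py | find_infinite_loop
-- ===== SOURCE A (Python) =====
-- def reallocate_blocks(blocks):
--     max_mem = max(blocks)
--     index = blocks.index(max_mem)
--     blocks[index] = 0
--     size = len(blocks)
--     min_to_add = int(max_mem / size)
--     blocks_with_extra = max_mem % size
--     blocks = blocks[index+1:] + blocks[:index+1]
--     for i in range(size):
--         mem_to_add = min_to_add
--         if (i < blocks_with_extra):
--             mem_to_add += 1
--         blocks[i] += mem_to_add
--     reverse_index = size - index
--     return blocks[reverse_index-1:] + blocks[:reverse_index-1]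
--
-- def find_infinite_loop(blocks):
--     past_states = dict()
--     counter = 0
--     while True:
--         blocks_hash = ','.join([str(b) for b in blocks])
--         if blocks_hash in past_states:
--             return counter, counter - past_states[blocks_hash]
--         past_states[blocks_hash] = counter
--         blocks = reallocate_blocks(blocks)
--         counter += 1
-- ===== SOURCE B (Python) =====
-- # Alternative: memoryless rho-search. Instead of keeping a dict of all serialized
-- # states, regenerate the orbit from the initial state each round and compare
-- # states directly. Return-value equivalent to A; like A, the first
-- # reallocate_blocks call zeroes one element of the caller's list in place.
--
-- def reallocate_blocks(blocks):
--     max_mem = max(blocks)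
--     index = blocks.index(max_mem)
--     blocks[index] = 0
--     size = len(blocks)
--     min_to_add = int(max_mem / size)
--     blocks_with_extra = max_mem % size
--     blocks = blocks[index+1:] + blocks[:index+1]
--     for i in range(size):
--         mem_to_add = min_to_add
--         if (i < blocks_with_extra):
--             mem_to_add += 1
--         blocks[i] += mem_to_add
--     reverse_index = size - index
--     return blocks[reverse_index-1:] + blocks[:reverse_index-1]
--
-- def _find_match(start, target, limit):
--     # index of the first of the `limit` first orbit states equal to target
--     probe = list(start)
--     for i in range(limit):
--         if probe == target:
--             return i
--         probe = reallocate_blocks(probe)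
--     return None
--
-- def find_infinite_loop(blocks):
--     start = list(blocks)
--     counter = 0
--     while True:
--         i = _find_match(start, blocks, counter)
--         if i is not None:
--             return counter, counter - i
--         blocks = reallocate_blocks(blocks)
--         counter += 1
-- ===== Notes on version B (the rewrite author's own statement) =====
-- stated objective: alternative
-- what changed: The dict of all serialized past states is replaced by a memoryless rho-search: each round regenerates the orbit from the initial state and compares states directly, trading the O(k) hash table for O(1) extra memory at quadratic cost.
import Mathlib
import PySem

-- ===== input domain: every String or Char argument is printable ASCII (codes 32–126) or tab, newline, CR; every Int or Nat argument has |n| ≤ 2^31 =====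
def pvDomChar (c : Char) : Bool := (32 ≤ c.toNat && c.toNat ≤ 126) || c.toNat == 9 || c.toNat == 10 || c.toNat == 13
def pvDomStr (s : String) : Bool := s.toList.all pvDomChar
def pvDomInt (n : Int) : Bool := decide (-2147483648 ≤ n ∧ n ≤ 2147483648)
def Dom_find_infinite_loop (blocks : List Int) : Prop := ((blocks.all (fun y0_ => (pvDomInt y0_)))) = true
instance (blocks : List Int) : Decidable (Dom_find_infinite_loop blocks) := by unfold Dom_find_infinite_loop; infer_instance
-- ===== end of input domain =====

-- B replaces A's dict-of-all-serialized-states cycle detection by a memoryless rho-search that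
-- regenerates the orbit from the initial state each round (alternative decomposition, not faster).
-- Both Pythons zero one element of the caller's list in place via the first reallocate_blocks
-- call; the equivalence proved here is about the return value (the side effect is identical).

-- ===== PORT A =====
-- shared module helper reallocate_blocks (both Pythons call the very same function)
def reallocate_blocks (blocks : List Int) : List Int :=
  match PySem.List.max? blocks (fun b => b) with
  | none => []      -- max([]) raises ValueError in Python; Pre_ excludes the empty list
  | some max_mem =>
    -- blocks.index(max_mem) is always `some` here (max? returns a member); getD 0 is unreachable
    let index : Nat := (PySem.List.index? blocks max_mem).getD 0
    let blocks1 := PySem.List.pySetD blocks (index : Int) 0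
    let size := blocks1.length
    -- int(max_mem / size): truncating division, exact for |max_mem| < 2^53 (PySem.Int.truncdiv)
    let min_to_add := PySem.Int.truncdiv max_mem (size : Int)
    let blocks_with_extra := PySem.Int.mod max_mem (size : Int)
    let rot := PySem.List.slice blocks1 (some ((index : Int) + 1)) none ++
               PySem.List.slice blocks1 none (some ((index : Int) + 1))
    -- for i in range(size): blocks[i] += min_to_add (+1 while i < blocks_with_extra)
    let rot2 := (List.range size).foldl
      (fun bs i => PySem.List.pySetD bs (i : Int)
        (PySem.List.pyGetD bs (i : Int) 0 +
          (min_to_add + (if (i : Int) < blocks_with_extra then 1 else 0)))) rot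
    let reverse_index : Int := (size : Int) - (index : Int)
    PySem.List.slice rot2 (some (reverse_index - 1)) none ++
      PySem.List.slice rot2 none (some (reverse_index - 1))

-- ','.join([str(b) for b in blocks])
def pyhash (blocks : List Int) : String :=
  PySem.Str.join "," (blocks.map PySem.Int.toStr)

-- fuel bounding the `while True`; shared by both ports, decremented once per outer iteration and
-- never exhausted on any input on which the Python programs finish within that many redistributions
def pvFuel : Nat := 2000000000

def findLoopA (past : PySem.Dict String Int) (counter : Int) (blocks : List Int) :
    Nat → Int × Int
  | 0 => (0, 0)
  | fuel+1 =>
    let h := pyhash blocks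
    match past.get? h with
    | some v => (counter, counter - v)
    | none => findLoopA (past.insert h counter) (counter + 1) (reallocate_blocks blocks) fuel

def find_infinite_loop (blocks : List Int) : Int × Int :=
  findLoopA PySem.Dict.empty 0 blocks pvFuel

-- ===== PORT B =====
-- _find_match(start, target, limit): first index i < limit with orbit state i equal to target
def findMatch (probe target : List Int) (i : Int) : Nat → Option Int
  | 0 => none
  | limit+1 =>
    if probe = target then some i
    else findMatch (reallocate_blocks probe) target (i + 1) limit

def findLoopB (start : List Int) (counter : Int) (blocks : List Int) : Nat → Int × Int
  | 0 => (0, 0)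
  | fuel+1 =>
    match findMatch start blocks 0 counter.toNat with  -- range(counter); counter is never negative
    | some i => (counter, counter - i)
    | none => findLoopB start (counter + 1) (reallocate_blocks blocks) fuel

def find_infinite_loop_alt (blocks : List Int) : Int × Int :=
  findLoopB blocks 0 blocks pvFuel

-- ===== PRECONDITION & SPEC =====
-- Pre_ excludes only the empty list, on which Python A raises ValueError (max of empty sequence).
def Pre_find_infinite_loop (blocks : List Int) : Prop := blocks ≠ []
instance (blocks : List Int) : Decidable (Pre_find_infinite_loop blocks) := by
  unfold Pre_find_infinite_loop; infer_instance

def pvWitness_find_infinite_loop : List Int := [0, 2, 7, 0]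

def Spec_find_infinite_loop (blocks : List Int) (out : Int × Int) : Prop :=
  out = find_infinite_loop_alt blocks
instance (blocks : List Int) (out : Int × Int) : Decidable (Spec_find_infinite_loop blocks out) := by
  unfold Spec_find_infinite_loop; infer_instance

-- ===== CLAIM (what is proved, stated in full; the proofs are below) =====
def Claim_equal_find_infinite_loop : Prop := ∀ (blocks : List Int), Dom_find_infinite_loop blocks → Pre_find_infinite_loop blocks → Spec_find_infinite_loop blocks (find_infinite_loop blocks)

-- ===== LEMMAS AND PROOFS =====

/- ## Decimal digit strings: `Nat.toDigits 10` characterised by a structural recursion -/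

def decDigits (n : Nat) : List Char :=
  if _h : n < 10 then [Nat.digitChar n]
  else decDigits (n / 10) ++ [Nat.digitChar (n % 10)]
  decreasing_by exact Nat.div_lt_self (by omega) (by omega)
lemma decDigits_lt {n : Nat} (h : n < 10) : decDigits n = [Nat.digitChar n] := by
  rw [decDigits]; simp [h]
lemma decDigits_ge {n : Nat} (h : 10 ≤ n) :
    decDigits n = decDigits (n / 10) ++ [Nat.digitChar (n % 10)] := by
  rw [decDigits]; simp [Nat.not_lt.mpr h]
lemma digitChar_inj {j k : Nat} (hj : j < 10) (hk : k < 10)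
    (h : Nat.digitChar j = Nat.digitChar k) : j = k := by
  interval_cases j <;> interval_cases k <;> simp_all <;> exact absurd h (by decide)

lemma mem_decDigits {c : Char} : ∀ {n : Nat}, c ∈ decDigits n → ∃ k, k < 10 ∧ c = Nat.digitChar k := by
  intro n
  induction n using Nat.strong_induction_on with
  | _ n ih =>
    intro hc
    by_cases h : n < 10
    · rw [decDigits_lt h] at hc
      simp at hc
      exact ⟨n, h, hc⟩
    · rw [decDigits_ge (by omega)] at hc
      rcases List.mem_append.mp hc with h1 | h1
      · exact ih (n / 10) (Nat.div_lt_self (by omega) (by omega)) h1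
      · simp at h1
        exact ⟨n % 10, Nat.mod_lt _ (by omega), h1⟩

lemma decDigits_ne_nil (n : Nat) : decDigits n ≠ [] := by
  by_cases h : n < 10
  · rw [decDigits_lt h]; simp
  · rw [decDigits_ge (by omega)]; simp

lemma decDigits_inj : ∀ (m n : Nat), decDigits m = decDigits n → m = n := by
  intro m
  induction m using Nat.strong_induction_on with
  | _ m ih =>
    intro n h
    by_cases hm : m < 10 <;> by_cases hn : n < 10
    · rw [decDigits_lt hm, decDigits_lt hn] at h
      exact digitChar_inj hm hn (by simpa using h)
    · rw [decDigits_lt hm, decDigits_ge (n := n) (by omega)] at h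
      have hlen := congrArg List.length h
      simp at hlen
      exact absurd hlen (decDigits_ne_nil _)
    · rw [decDigits_ge (n := m) (by omega), decDigits_lt hn] at h
      have hlen := congrArg List.length h
      simp at hlen
      exact absurd hlen (decDigits_ne_nil _)
    · rw [decDigits_ge (n := m) (by omega), decDigits_ge (n := n) (by omega)] at h
      obtain ⟨ha, hb⟩ := List.append_inj' h (by simp)
      have hdiv := ih (m / 10) (Nat.div_lt_self (by omega) (by omega)) _ ha
      have hmod : m % 10 = n % 10 :=
        digitChar_inj (Nat.mod_lt _ (by omega)) (Nat.mod_lt _ (by omega)) (by simpa using hb)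
      omega

lemma toDigitsCore_eq : ∀ (fuel n : Nat) (acc : List Char), 0 < fuel → n < 10 ^ fuel →
    Nat.toDigitsCore 10 fuel n acc = decDigits n ++ acc := by
  intro fuel
  induction fuel with
  | zero => omega
  | succ f ih =>
    intro n acc _ hlt
    rw [Nat.toDigitsCore]
    by_cases h : n / 10 = 0
    · have hn : n < 10 := by omega
      rw [if_pos h, decDigits_lt hn, Nat.mod_eq_of_lt hn]
      simp
    · rw [if_neg h]
      have hf : 0 < f := by
        by_contra hf
        have : f = 0 := by omega
        subst this
        simp at hlt
        omega
      have hdivlt : n / 10 < 10 ^ f := by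
        rw [Nat.div_lt_iff_lt_mul (by omega)]
        calc n < 10 ^ (f + 1) := hlt
        _ = 10 ^ f * 10 := by ring
      have := ih (n / 10) (Nat.digitChar (n % 10) :: acc) hf hdivlt
      rw [this, decDigits_ge (n := n) (by omega)]
      simp

lemma toDigits_eq (n : Nat) : Nat.toDigits 10 n = decDigits n := by
  have h1 : n < 10 ^ (n + 1) := by
    calc n < 2 ^ (n + 1) := Nat.lt_two_pow_self.trans (Nat.pow_lt_pow_succ (by omega))
    _ ≤ 10 ^ (n + 1) := Nat.pow_le_pow_left (by omega) _
  have := toDigitsCore_eq (n + 1) n [] (by omega) h1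
  simpa [Nat.toDigits] using this

lemma toChars_ne_nil (n : Int) : PySem.Int.toChars n ≠ [] := by
  unfold PySem.Int.toChars
  split_ifs
  · simp
  · rw [toDigits_eq]; exact decDigits_ne_nil _

lemma comma_not_mem_toChars (n : Int) : ',' ∉ PySem.Int.toChars n := by
  unfold PySem.Int.toChars
  split_ifs <;> rw [toDigits_eq] <;> intro hc
  · rcases List.mem_cons.mp hc with h | h
    · exact absurd h (by decide)
    · obtain ⟨k, hk, he⟩ := mem_decDigits h
      interval_cases k <;> exact absurd he (by decide)
  · obtain ⟨k, hk, he⟩ := mem_decDigits hc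
    interval_cases k <;> exact absurd he (by decide)

lemma dash_not_mem_decDigits (n : Nat) : '-' ∉ decDigits n := by
  intro hc
  obtain ⟨k, hk, he⟩ := mem_decDigits hc
  interval_cases k <;> exact absurd he (by decide)

lemma toChars_inj {m n : Int} (h : PySem.Int.toChars m = PySem.Int.toChars n) : m = n := by
  unfold PySem.Int.toChars at h
  split_ifs at h with hm hn hn
  · rw [toDigits_eq, toDigits_eq] at h
    have h2 := decDigits_inj _ _ (by simpa using congrArg List.tail h)
    omega
  · rw [toDigits_eq, toDigits_eq] at h
    have : '-' ∈ decDigits n.toNat := h ▸ List.mem_cons_self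
    exact absurd this (dash_not_mem_decDigits _)
  · rw [toDigits_eq, toDigits_eq] at h
    have : '-' ∈ decDigits m.toNat := h ▸ List.mem_cons_self
    exact absurd this (dash_not_mem_decDigits _)
  · rw [toDigits_eq, toDigits_eq] at h
    have h2 := decDigits_inj _ _ h
    omega

lemma append_comma_inj : ∀ (a b r1 r2 : List Char), ',' ∉ a → ',' ∉ b →
    a ++ ',' :: r1 = b ++ ',' :: r2 → a = b ∧ r1 = r2 := by
  intro a
  induction a with
  | nil =>
    intro b r1 r2 _ hb h
    cases b with
    | nil => simpa using h
    | cons x xs =>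
      simp at h
      exact absurd (h.1 ▸ List.mem_cons_self) hb
  | cons x xs ih =>
    intro b r1 r2 ha hb h
    cases b with
    | nil =>
      simp at h
      exact absurd (h.1 ▸ List.mem_cons_self) ha
    | cons y ys =>
      simp at h
      obtain ⟨hxy, hrest⟩ := h
      have := ih ys r1 r2 (fun hc => ha (List.mem_cons_of_mem _ hc))
        (fun hc => hb (List.mem_cons_of_mem _ hc)) hrest
      exact ⟨by simp [hxy, this.1], this.2⟩

lemma join_comma_inj : ∀ (p1 p2 : List (List Char)),
    (∀ x ∈ p1, x ≠ [] ∧ ',' ∉ x) → (∀ x ∈ p2, x ≠ [] ∧ ',' ∉ x) →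
    PySem.Chars.join [','] p1 = PySem.Chars.join [','] p2 → p1 = p2 := by
  intro p1
  induction p1 with
  | nil =>
    intro p2 _ h2 h
    cases p2 with
    | nil => rfl
    | cons b t2 =>
      rw [PySem.Chars.join_nil] at h
      cases t2 with
      | nil =>
        rw [PySem.Chars.join_singleton] at h
        exact absurd h.symm (h2 b (by simp)).1
      | cons c t2' =>
        rw [PySem.Chars.join_cons_cons] at h
        have := congrArg List.length h
        simp at this
  | cons a t1 ih =>
    intro p2 h1 h2 h
    cases p2 with
    | nil =>
      rw [PySem.Chars.join_nil] at h
      cases t1 with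
      | nil =>
        rw [PySem.Chars.join_singleton] at h
        exact absurd h (h1 a (by simp)).1
      | cons c t1' =>
        rw [PySem.Chars.join_cons_cons] at h
        have := congrArg List.length h
        simp at this
    | cons b t2 =>
      cases t1 with
      | nil =>
        cases t2 with
        | nil =>
          rw [PySem.Chars.join_singleton, PySem.Chars.join_singleton] at h
          simp [h]
        | cons c t2' =>
          rw [PySem.Chars.join_singleton, PySem.Chars.join_cons_cons] at h
          have : ',' ∈ a := by
            rw [h]; simp
          exact absurd this (h1 a (by simp)).2
      | cons c t1' =>
        cases t2 with
        | nil =>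
          rw [PySem.Chars.join_singleton, PySem.Chars.join_cons_cons] at h
          have : ',' ∈ b := by
            rw [← h]; simp
          exact absurd this (h2 b (by simp)).2
        | cons d t2' =>
          rw [PySem.Chars.join_cons_cons, PySem.Chars.join_cons_cons] at h
          simp only [List.append_assoc, List.singleton_append] at h
          obtain ⟨hab, hrest⟩ := append_comma_inj a b _ _ (h1 a (by simp)).2 (h2 b (by simp)).2 h
          have := ih (d :: t2') (fun x hx => h1 x (List.mem_cons_of_mem _ hx))
            (fun x hx => h2 x (List.mem_cons_of_mem _ hx)) hrest
          rw [hab, this]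

lemma pyhash_inj {l1 l2 : List Int} (h : pyhash l1 = pyhash l2) : l1 = l2 := by
  have h2 := congrArg String.toList h
  rw [pyhash, pyhash, PySem.Str.toList_join, PySem.Str.toList_join] at h2
  simp only [List.map_map] at h2
  have hcomp : ∀ l : List Int, l.map (String.toList ∘ PySem.Int.toStr) = l.map PySem.Int.toChars := by
    intro l
    exact List.map_congr_left (fun x _ => PySem.Int.toList_toStr x)
  rw [hcomp, hcomp] at h2
  have hsep : (",").toList = [','] := by decide
  rw [hsep] at h2
  have hparts : ∀ (l : List Int), ∀ x ∈ l.map PySem.Int.toChars, x ≠ [] ∧ ',' ∉ x := by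
    intro l x hx
    obtain ⟨n, _, rfl⟩ := List.mem_map.mp hx
    exact ⟨toChars_ne_nil n, comma_not_mem_toChars n⟩
  have := join_comma_inj _ _ (hparts l1) (hparts l2) h2
  exact List.map_injective_iff.mpr (fun a b => toChars_inj) this

/- ## The orbit of the redistribution map, A's dict of seen states, B's orbit rescans -/

def orb (start : List Int) (k : Nat) : List Int := reallocate_blocks^[k] start

def orbDict (start : List Int) (k : Nat) : PySem.Dict String Int :=
  (List.range k).foldl (fun d i => d.insert (pyhash (orb start i)) (i : Int)) PySem.Dict.empty

lemma orb_succ (start : List Int) (k : Nat) :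
    orb start (k + 1) = reallocate_blocks (orb start k) := by
  simp [orb, Function.iterate_succ_apply']

lemma orbDict_succ (start : List Int) (k : Nat) :
    orbDict start (k + 1) = (orbDict start k).insert (pyhash (orb start k)) (k : Int) := by
  simp [orbDict, List.range_succ]

lemma findMatch_none {start target : List Int} : ∀ (limit j : Nat),
    (∀ m, m < limit → orb start (j + m) ≠ target) →
    findMatch (orb start j) target (j : Int) limit = none := by
  intro limit
  induction limit with
  | zero => intro j _; simp [findMatch]
  | succ n ih =>
    intro j h
    have h0 : orb start j ≠ target := by simpa using h 0 (by omega)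
    rw [findMatch, if_neg h0, ← orb_succ]
    have := ih (j + 1) (fun m hm => by
      have := h (m + 1) (by omega); simpa [Nat.add_assoc, Nat.add_comm 1 m] using this)
    simpa [Nat.cast_add] using this

lemma findMatch_least {start target : List Int} : ∀ (limit j m₀ : Nat),
    m₀ < limit → orb start (j + m₀) = target → (∀ m, m < m₀ → orb start (j + m) ≠ target) →
    findMatch (orb start j) target (j : Int) limit = some ((j : Int) + (m₀ : Int)) := by
  intro limit
  induction limit with
  | zero => intro j m₀ h; omega
  | succ n ih =>
    intro j m₀ hlt heq hleast
    match m₀ with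
    | 0 => rw [findMatch, if_pos (by simpa using heq)]; simp
    | m+1 =>
      have h0 : orb start j ≠ target := by simpa using hleast 0 (by omega)
      rw [findMatch, if_neg h0, ← orb_succ]
      have := ih (j + 1) m (by omega) (by simpa [Nat.add_assoc, Nat.add_comm 1 m] using heq)
        (fun m' hm' => by
          have := hleast (m' + 1) (by omega)
          simpa [Nat.add_assoc, Nat.add_comm 1 m'] using this)
      rw [show ((j:Int)+1) = ((j+1 : Nat) : Int) by push_cast; ring] at *
      rw [this]; congr 1; push_cast; ring

lemma get?_orbDict {start : List Int} : ∀ {k : Nat},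
    (∀ i j, i < j → j < k → orb start i ≠ orb start j) → ∀ (x : List Int) (v : Int),
    ((orbDict start k).get? (pyhash x) = some v ↔ ∃ i : Nat, i < k ∧ orb start i = x ∧ v = (i : Int)) := by
  intro k
  induction k with
  | zero => intro _ x v; simp [orbDict, PySem.Dict.get?_empty]
  | succ n ih =>
    intro hdist x v
    rw [orbDict_succ, PySem.Dict.get?_insert]
    by_cases hx : pyhash x = pyhash (orb start n)
    · have hxe : orb start n = x := (pyhash_inj hx).symm
      rw [if_pos hx]
      constructor
      · rintro h; injection h with h
        exact ⟨n, by omega, hxe, h.symm⟩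
      · rintro ⟨i, hi, hie, hv⟩
        have : i = n := by
          by_contra hne
          exact hdist i n (by omega) (by omega) (hie.trans hxe.symm)
        simp [hv, this]
    · rw [if_neg hx]
      rw [ih (fun i j hij hj => hdist i j hij (by omega)) x v]
      constructor
      · rintro ⟨i, hi, hie, hv⟩; exact ⟨i, by omega, hie, hv⟩
      · rintro ⟨i, hi, hie, hv⟩
        refine ⟨i, ?_, hie, hv⟩
        rcases Nat.lt_succ_iff_lt_or_eq.mp hi with h | h
        · exact h
        · exact absurd (by rw [h] at hie; rw [hie]) hx

lemma loop_lockstep (start : List Int) : ∀ (fuel k : Nat),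
    (∀ i j, i < j → j < k → orb start i ≠ orb start j) →
    findLoopA (orbDict start k) (k : Int) (orb start k) fuel =
      findLoopB start (k : Int) (orb start k) fuel := by
  intro fuel
  induction fuel with
  | zero => intro k _; simp [findLoopA, findLoopB]
  | succ n ih =>
    intro k hdist
    rw [findLoopA, findLoopB]
    by_cases hex : ∃ i, i < k ∧ orb start i = orb start k
    · -- a repeat: both sides return (k, k - i₀) with i₀ the least earlier index
      let i₀ := Nat.find hex
      obtain ⟨hi₀k, hi₀e⟩ := Nat.find_spec hex
      have hleast : ∀ m, m < i₀ → orb start m ≠ orb start k := fun m hm hme =>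
        Nat.find_min hex hm ⟨by omega, hme⟩
      have hA : (orbDict start k).get? (pyhash (orb start k)) = some (i₀ : Int) :=
        (get?_orbDict hdist _ _).mpr ⟨i₀, hi₀k, hi₀e, rfl⟩
      have hB : findMatch start (orb start k) 0 ((k : Int)).toNat = some (i₀ : Int) := by
        have := findMatch_least (start := start) (target := orb start k) k 0 i₀ hi₀k
          (by simpa using hi₀e) (by simpa using hleast)
        simpa [orb] using this
      rw [hA, hB]
    · -- no repeat yet: both sides advance in lockstep
      have hex : ∀ i, i < k → orb start i ≠ orb start k :=
        fun i hi he => hex ⟨i, hi, he⟩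
      have hA : (orbDict start k).get? (pyhash (orb start k)) = none := by
        rcases ho : (orbDict start k).get? (pyhash (orb start k)) with _ | v
        · rfl
        · obtain ⟨i, hi, hie, _⟩ := (get?_orbDict hdist _ _).mp ho
          exact absurd hie (hex i hi)
      have hB : findMatch start (orb start k) 0 ((k : Int)).toNat = none := by
        have := findMatch_none (start := start) (target := orb start k) k 0
          (fun m hm => by simpa using hex m hm)
        simpa [orb] using this
      rw [hA, hB]
      have hdist' : ∀ i j, i < j → j < k + 1 → orb start i ≠ orb start j := by
        intro i j hij hj
        rcases Nat.lt_succ_iff_lt_or_eq.mp hj with h | h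
        · exact hdist i j hij h
        · subst h; exact hex i hij
      have := ih (k + 1) hdist'
      rw [orbDict_succ, orb_succ] at this
      simpa [Nat.cast_add] using this

-- ===== VERDICT (by name: the statement is the Claim_ definition above) =====
theorem find_infinite_loop_spec : Claim_equal_find_infinite_loop := by
  intro blocks _ _
  unfold Spec_find_infinite_loop
  have h := loop_lockstep blocks pvFuel 0 (by omega)
  simpa [find_infinite_loop, find_infinite_loop_alt, orb, orbDict] using h
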